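-- pv_equiv track=rewrite | github.com/AJBats/saturn-daytona-cce-re | tools/split_modules.py | find_function_entries
-- ===== SOURCE A (Python) =====
-- def _scan_backwards_for_prologue_start(data, i):
--     """Given an offset `i` of a prologue instruction (mov.l r14,@-r15 or
--     sts.l pr,@-r15), scan backwards for contiguous callee-saved register
--     pushes: mov.l Rn,@-r15 where Rn = r8..r13 (opcodes 0x2F86..0x2FD6).
--
--     CCE compiler saves registers high-to-low: r8 first, then r9, ..., r14.
--     The true function entry is at the earliest such push.
--
--     Returns the offset of the true entry.
--     """
--     entry = i
--     j = i - 2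
--     while j >= 0:
--         ph, pl = data[j], data[j + 1]
--         # mov.l Rn,@-r15 where Rn = r8..r14: opcode = 0x2Fn6, n in {8..E}
--         if ph == 0x2F and (pl & 0x0F) == 0x06 and 0x86 <= pl <= 0xE6:
--             entry = j
--             j -= 2
--         else:
--             break
--     return entry
--
-- def find_function_entries(data):
--     """
--     Scan for function entry points using SH-2 GCC prologue patterns:
--       - mov.l r14,@-r15  (0x2FE6)  always starts a new function
--       - sts.l pr,@-r15   (0x4F22)  starts a new function UNLESS immediately
--         preceded by a register push (mov.l rN,@-r15), in which case it is
--         part of an existing prologue.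
--
--     When a prologue marker is found, scans backwards for preceding register
--     saves (r8-r13) to find the true entry point.
--
--     Returns a sorted list of byte offsets within the file.
--     Always includes offset 0 (file start = entry point).
--     """
--     entries = set([0])  # file start is always an entry
--     i = 0
--     while i < len(data) - 1:
--         hi, lo = data[i], data[i + 1]
--
--         if hi == 0x2F and lo == 0xE6:       # mov.l r14,@-r15
--             entry = _scan_backwards_for_prologue_start(data, i)
--             entries.add(entry)
--             i += 2
--             continue
--
--         if hi == 0x4F and lo == 0x22:       # sts.l pr,@-r15
--             entry = _scan_backwards_for_prologue_start(data, i)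
--             if entry < i:
--                 # Preceded by register saves — this is mid-prologue, skip
--                 i += 2
--                 continue
--             entries.add(i)
--
--         i += 2
--
--     return sorted(entries)
-- ===== SOURCE B (Python) =====
-- def find_function_entries(data):
--     # One forward pass: maintain b = start of the contiguous run of callee-saved
--     # pushes (mov.l r8..r14,@-r15) ending just before offset i, instead of
--     # rescanning backwards at each prologue marker.
--     entries = {0}
--     b = 0
--     n = len(data)
--     for i in range(0, n - 1, 2):
--         hi, lo = data[i], data[i + 1]
--         if hi == 0x2F and lo == 0xE6:
--             entries.add(b)
--         elif hi == 0x4F and lo == 0x22 and b == i: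
--             entries.add(i)
--         if not (hi == 0x2F and (lo & 0x0F) == 0x06 and 0x86 <= lo <= 0xE6):
--             b = i + 2
--     return sorted(entries)
-- ===== Notes on version B (the rewrite author's own statement) =====
-- stated objective: faster
-- what changed: Replaces the backward rescan at each prologue marker with a single forward pass that maintains the start of the current contiguous push run, turning O(n^2) worst case into O(n).
import Mathlib
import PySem

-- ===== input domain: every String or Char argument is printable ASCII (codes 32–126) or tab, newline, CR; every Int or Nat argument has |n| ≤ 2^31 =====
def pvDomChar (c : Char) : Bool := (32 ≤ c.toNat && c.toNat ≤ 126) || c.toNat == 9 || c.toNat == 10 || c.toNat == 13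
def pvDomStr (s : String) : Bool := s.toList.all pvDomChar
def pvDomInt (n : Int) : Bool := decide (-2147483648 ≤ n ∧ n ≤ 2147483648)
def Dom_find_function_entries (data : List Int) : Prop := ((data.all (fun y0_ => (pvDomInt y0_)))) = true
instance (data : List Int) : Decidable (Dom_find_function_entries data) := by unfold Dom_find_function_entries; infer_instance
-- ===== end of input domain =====

-- B replaces A's backward rescan at each prologue marker with one forward pass
-- maintaining the start of the current contiguous push run (objective: faster).


-- ===== PORT A =====
-- _scan_backwards_for_prologue_start's while loop: j starts at i - 2 and steps by -2
-- while j >= 0, so it is transcribed with j as a Nat (the wrapper pvScanA below handles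
-- the j < 0 entry case); indices are always in range at A's call sites, so data[j] is
-- read with List.getD (exact there).
def pvScanBackA (data : List Int) (j : Nat) (entry : Int) : Int :=
  let ph := data.getD j 0
  let pl := data.getD (j + 1) 0
  if ph == 0x2F && PySem.Int.band pl 0x0F == 0x06
      && decide (0x86 ≤ pl) && decide (pl ≤ 0xE6) then
    -- entry = j; j -= 2 (the loop exits returning j when j - 2 < 0)
    match j with
    | j' + 2 => pvScanBackA data j' ((j' : Int) + 2)
    | _ => (j : Int)
  else entry

-- _scan_backwards_for_prologue_start(data, i): entry = i, first test is j = i - 2 >= 0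
def pvScanA (data : List Int) (i : Int) : Int :=
  if i - 2 < 0 then i else pvScanBackA data (i - 2).toNat i

-- the main while loop advances i by 2 unconditionally, so it is the for-loop
-- 'for i in range(0, len(data) - 1, 2)': a foldl over PySem.List.pyRange
def find_function_entries (data : List Int) : List Int :=
  let entries :=
    (PySem.List.pyRange 0 ((data.length : Int) - 1) 2).foldl
      (fun entries i =>
        let hi := data.getD i.toNat 0
        let lo := data.getD (i + 1).toNat 0
        if hi == 0x2F && lo == 0xE6 then
          PySem.Set.add entries (pvScanA data i)
        else if hi == 0x4F && lo == 0x22 then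
          (if pvScanA data i < i then entries else PySem.Set.add entries i)
        else entries)
      (PySem.Set.ofList [0])
  PySem.List.sorted entries (fun x => x) false

-- ===== PORT B =====
-- one forward pass; the state is (entries, b) where b is the start of the
-- contiguous push run ending just before offset i
def find_function_entries_alt (data : List Int) : List Int :=
  let st :=
    (PySem.List.pyRange 0 ((data.length : Int) - 1) 2).foldl
      (fun st i =>
        let hi := data.getD i.toNat 0
        let lo := data.getD (i + 1).toNat 0
        let entries :=
          if hi == 0x2F && lo == 0xE6 then PySem.Set.add st.1 st.2
          else if hi == 0x4F && lo == 0x22 && st.2 == i then PySem.Set.add st.1 i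
          else st.1
        let b :=
          if hi == 0x2F && PySem.Int.band lo 0x0F == 0x06
              && decide (0x86 ≤ lo) && decide (lo ≤ 0xE6)
          then st.2 else i + 2
        (entries, b))
      (PySem.Set.ofList [0], 0)
  PySem.List.sorted st.1 (fun x => x) false

-- ===== PRECONDITION & SPEC =====
def Spec_find_function_entries (data : List Int) (out : List Int) : Prop := out = find_function_entries_alt data
instance (data : List Int) (out : List Int) : Decidable (Spec_find_function_entries data out) := by unfold Spec_find_function_entries; infer_instance

-- ===== CLAIM (what is proved, stated in full; the proofs are below) =====
def Claim_equal_find_function_entries : Prop := ∀ (data : List Int), Dom_find_function_entries data → Spec_find_function_entries data (find_function_entries data)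

-- ===== LEMMAS AND PROOFS =====

-- pyRange with step 2 peels off its head
theorem pvRange_two_cons (a b : Int) (h : a < b) :
    PySem.List.pyRange a b 2 = a :: PySem.List.pyRange (a + 2) b 2 := by
  rw [PySem.List.pyRange_of_pos a b (by norm_num),
      PySem.List.pyRange_of_pos (a + 2) b (by norm_num)]
  by_cases h2 : a + 2 < b
  · rw [if_pos h, if_pos h2]
    have hn : (b - a + 2 - 1) / 2 = (b - (a + 2) + 2 - 1) / 2 + 1 := by omega
    have hn' : ((b - a + 2 - 1) / 2).toNat = ((b - (a + 2) + 2 - 1) / 2).toNat + 1 := by omega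
    rw [hn', List.range_succ_eq_map]
    simp only [List.map_cons, List.map_map]
    congr 1
    · norm_num
    · refine List.map_congr_left (fun k _ => ?_)
      simp only [Function.comp]
      push_cast
      ring
  · rw [if_pos h, if_neg h2]
    have hn : ((b - a + 2 - 1) / 2).toNat = 1 := by omega
    rw [hn]
    simp
theorem pvRange_two_nil (a b : Int) (h : ¬ a < b) : PySem.List.pyRange a b 2 = [] := by
  rw [PySem.List.pyRange_of_pos a b (by norm_num), if_neg h]
  simp

-- the backward scan returns its entry argument or an offset ≤ j
-- one unfolding of the backward scan at an offset of the form j + 2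
theorem pvScanBackA_step2 (data : List Int) (j : Nat) (entry : Int) :
    pvScanBackA data (j + 2) entry =
      (if data.getD (j + 2) 0 == 0x2F
          && PySem.Int.band (data.getD (j + 2 + 1) 0) 0x0F == 0x06
          && decide (0x86 ≤ data.getD (j + 2 + 1) 0)
          && decide (data.getD (j + 2 + 1) 0 ≤ 0xE6)
       then pvScanBackA data j ((j : Int) + 2) else entry) := rfl

-- the backward scan returns its entry argument or an offset ≤ j
theorem pvScanBackA_le (data : List Int) : ∀ (j : Nat) (entry : Int),
    pvScanBackA data j entry = entry ∨ pvScanBackA data j entry ≤ (j : Int) := by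
  intro j
  induction j using Nat.strong_induction_on with
  | _ j ih =>
    intro entry
    match j with
    | 0 =>
        rw [pvScanBackA]
        split
        · right; norm_num
        · left; rfl
        all_goals (intro j' h'; omega)
    | 1 =>
        rw [pvScanBackA]
        split
        · right; norm_num
        · left; rfl
        all_goals (intro j' h'; omega)
    | (j' + 2) =>
        rw [pvScanBackA_step2]
        split
        · rcases ih j' (by omega) ((j' : Int) + 2) with h | h
          · right; rw [h]; push_cast; omega
          · right; push_cast at h ⊢; omega
        · left; rfl

-- the scan result is its argument i, or lies at most i - 2
theorem pvScanA_le (data : List Int) (i : Int) :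
    pvScanA data i = i ∨ pvScanA data i ≤ i - 2 := by
  unfold pvScanA
  by_cases h : i - 2 < 0
  · left; rw [if_pos h]
  · rw [if_neg h]
    rcases pvScanBackA_le data (i - 2).toNat i with h' | h'
    · left; exact h'
    · right; omega

-- recurrence: the scan result for i + 2 in terms of the scan result for i
theorem pvScanA_step (data : List Int) (i : Int) (h : 0 ≤ i) :
    pvScanA data (i + 2) =
      (if data.getD i.toNat 0 == 0x2F
          && PySem.Int.band (data.getD (i + 1).toNat 0) 0x0F == 0x06
          && decide (0x86 ≤ data.getD (i + 1).toNat 0)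
          && decide (data.getD (i + 1).toNat 0 ≤ 0xE6)
       then pvScanA data i else i + 2) := by
  have e0 : ¬ (i + 2 - 2 < 0) := by omega
  have e1 : (i + 2 - 2).toNat = i.toNat := by omega
  rcases hc : i.toNat with _ | _ | j
  · -- i = 0
    have hi0 : i = 0 := by omega
    subst hi0
    rw [pvScanA, if_neg e0, e1, hc, pvScanBackA, pvScanA]
    norm_num
    all_goals (intro j' h'; omega)
  · -- i = 1 (never reached on even offsets, but still faithful)
    have hi1 : i = 1 := by omega
    subst hi1
    rw [pvScanA, if_neg e0, e1, hc, pvScanBackA, pvScanA]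
    norm_num
    all_goals first
      | (intro j' h'; omega)
      | (have h2 : Int.toNat 2 = 2 := rfl; rw [h2])
  · -- i ≥ 2
    have hj : i.toNat = (i - 2).toNat + 2 := by omega
    have c1 : (i - 2).toNat + 2 = i.toNat := by omega
    have c3 : (((i - 2).toNat : Int)) + 2 = i := by omega
    have c4 : i.toNat + 1 = (i + 1).toNat := by omega
    have hnneg : ¬ (i - 2 < 0) := by omega
    rw [pvScanA, if_neg e0, e1, hj, pvScanBackA_step2, c1, c4, c3, ← hc,
        pvScanA, if_neg hnneg]

-- main invariant, fuel-indexed: B's running b equals A's backward-scan result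
theorem pvLoop_eq_aux (data : List Int) :
    ∀ n : Nat, ∀ i : Int, 0 ≤ i → ((data.length : Int) - 1 - i).toNat ≤ n →
      ∀ entries : PySem.Set Int,
        (PySem.List.pyRange i ((data.length : Int) - 1) 2).foldl
          (fun entries i =>
            let hi := data.getD i.toNat 0
            let lo := data.getD (i + 1).toNat 0
            if hi == 0x2F && lo == 0xE6 then
              PySem.Set.add entries (pvScanA data i)
            else if hi == 0x4F && lo == 0x22 then
              (if pvScanA data i < i then entries else PySem.Set.add entries i)
            else entries)
          entries
        = ((PySem.List.pyRange i ((data.length : Int) - 1) 2).foldl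
            (fun st i =>
              let hi := data.getD i.toNat 0
              let lo := data.getD (i + 1).toNat 0
              let entries :=
                if hi == 0x2F && lo == 0xE6 then PySem.Set.add st.1 st.2
                else if hi == 0x4F && lo == 0x22 && st.2 == i then PySem.Set.add st.1 i
                else st.1
              let b :=
                if hi == 0x2F && PySem.Int.band lo 0x0F == 0x06
                    && decide (0x86 ≤ lo) && decide (lo ≤ 0xE6)
                then st.2 else i + 2
              (entries, b))
            (entries, pvScanA data i)).1 := by
  intro n
  induction n with
  | zero =>
      intro i hi0 hn entries
      have hge : ¬ i < (data.length : Int) - 1 := by omega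
      rw [pvRange_two_nil _ _ hge]
      rfl
  | succ n ih =>
      intro i hi0 hn entries
      by_cases hlt : i < (data.length : Int) - 1
      · rw [pvRange_two_cons _ _ hlt, List.foldl_cons, List.foldl_cons]
        simp only []
        have hstep := pvScanA_step data i hi0
        have hle := pvScanA_le data i
        have hfuel : ((data.length : Int) - 1 - (i + 2)).toNat ≤ n := by omega
        have hi2 : (0 : Int) ≤ i + 2 := by omega
        by_cases h1 : (data.getD i.toNat 0 == (0x2F : Int)
            && data.getD (i + 1).toNat 0 == (0xE6 : Int)) = true
        · -- mov.l r14,@-r15: both sides add the scan result / b and recurse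
          rw [if_pos h1, if_pos h1, ih (i + 2) hi2 hfuel, hstep]
        · by_cases h2 : (data.getD i.toNat 0 == (0x4F : Int)
              && data.getD (i + 1).toNat 0 == (0x22 : Int)) = true
          · -- sts.l pr,@-r15: A adds i iff the scan stayed at i, B iff b == i
            rw [if_neg h1, if_neg h1, if_pos h2]
            by_cases h3 : pvScanA data i < i
            · have hb : (pvScanA data i == i) = false := by
                simp only [beq_eq_false_iff_ne, ne_eq]; omega
              rw [if_pos h3, ih (i + 2) hi2 hfuel, hstep]
              simp [hb]
            · have hb : (pvScanA data i == i) = true := by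
                simp only [beq_iff_eq]
                rcases hle with h | h
                · exact h
                · omega
              rw [if_neg h3, ih (i + 2) hi2 hfuel, hstep]
              simp only [Bool.and_eq_true, beq_iff_eq, List.getD_eq_getElem?_getD] at h2
              simp [hb, h2.1, h2.2]
          · -- any other word: neither side adds anything
            rw [if_neg h1, if_neg h1, if_neg h2, ih (i + 2) hi2 hfuel, hstep]
            simp only [Bool.and_eq_true, beq_iff_eq, List.getD_eq_getElem?_getD] at h2
            simp [h2]
      · rw [pvRange_two_nil _ _ hlt]
        rfl

-- ===== VERDICT (by name: the statement is the Claim_ definition above) =====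
theorem find_function_entries_spec : Claim_equal_find_function_entries := by
  intro data _
  unfold Spec_find_function_entries find_function_entries find_function_entries_alt
  have h0 : pvScanA data 0 = 0 := by unfold pvScanA; norm_num
  rw [pvLoop_eq_aux data (((data.length : Int) - 1 - 0).toNat) 0 le_rfl le_rfl, h0]
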